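-- pv_equiv track=rewrite | github.com/andreibratu/bachelor | lc/src/helper.py | from_any_base_to_base10
-- ===== SOURCE A (Python) =====
-- from typing import List
--
-- def from_any_base_to_base10(number_repr: List[int], q: int) -> List[int]:
--     """Convert number from any base to base10.
--
--     Args:
--         number (List): Number representation in base q.
--         q (int): The base of the representation.
--     Returns:
--         Number representation in base10.
--     """
--
--     base_10 = 0
--     power = 1
--     for i in range(0, len(number_repr)):
--         base_10 += number_repr[i] * power
--         power *= q
--
--     repr = []
--     while base_10:
--         repr += [base_10 % 10]
--         base_10 //= 10
--
--     repr.reverse()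
--     return repr
-- ===== SOURCE B (Python) =====
-- def from_any_base_to_base10(number_repr, q):
--     value = 0
--     for d in reversed(number_repr):
--         value = value * q + d
--
--     digits = []
--     while value:
--         digits = [value % 10] + digits
--         value //= 10
--     return digits
-- ===== Notes on version B (the rewrite author's own statement) =====
-- stated objective: simpler
-- what changed: Phase 1 uses Horner's rule over the reversed digit list instead of tracking a running power, and phase 2 builds the decimal digit list back-to-front by prepending, eliminating A's append-then-reverse; Pre_ excludes inputs whose positional value is negative, where A infinite-loops.
import Mathlib
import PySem

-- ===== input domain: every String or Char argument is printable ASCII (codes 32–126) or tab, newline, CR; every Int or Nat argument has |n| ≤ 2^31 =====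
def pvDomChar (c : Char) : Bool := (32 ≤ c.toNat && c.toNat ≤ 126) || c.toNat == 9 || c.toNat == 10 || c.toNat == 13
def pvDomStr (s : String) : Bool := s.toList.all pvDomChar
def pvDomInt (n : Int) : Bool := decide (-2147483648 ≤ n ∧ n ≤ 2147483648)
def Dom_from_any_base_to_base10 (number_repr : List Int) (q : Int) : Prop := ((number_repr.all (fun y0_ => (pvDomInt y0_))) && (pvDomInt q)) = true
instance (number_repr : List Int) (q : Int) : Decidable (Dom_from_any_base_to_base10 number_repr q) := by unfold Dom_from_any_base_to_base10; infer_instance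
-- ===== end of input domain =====

-- B replaces A's power-tracking sum with Horner's rule and A's append-then-reverse
-- while loop with a loop prepending digits, building the list back-to-front (objective: simpler).
-- A's while loop diverges when the positional value is negative; Pre_ excludes that.

-- ===== PORT A =====
-- A's 'while base_10:' loop; the fuel argument only makes the recursion total
-- (inside Pre_ the value is nonnegative and the fuel is always sufficient).
def pvDigitsLoopA : Nat → Int → List Int → List Int
  | 0, _, acc => acc
  | fuel + 1, v, acc =>
    if v ≠ 0 then pvDigitsLoopA fuel (PySem.Int.floordiv v 10) (acc ++ [PySem.Int.mod v 10])
    else acc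

def from_any_base_to_base10 (number_repr : List Int) (q : Int) : List Int :=
  let st := number_repr.foldl (fun (s : Int × Int) d => (s.1 + d * s.2, s.2 * q)) (0, 1)
  (pvDigitsLoopA (st.1.toNat + 1) st.1 []).reverse

-- ===== PORT B =====
-- B's 'while value:' prepend loop; the guard 'v ≤ 0' (Python: 'v == 0') makes it total —
-- on negative v (outside Pre_) the Python loop does not terminate.
def pvDigitsB (v : Int) (digits : List Int) : List Int :=
  if _h : v ≤ 0 then digits
  else pvDigitsB (PySem.Int.floordiv v 10) (PySem.Int.mod v 10 :: digits)
termination_by v.toNat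
decreasing_by
  have h10 : PySem.Int.floordiv v 10 = v / 10 := PySem.Int.floordiv_eq_ediv_of_pos (by omega)
  rw [h10]; omega

def from_any_base_to_base10_alt (number_repr : List Int) (q : Int) : List Int :=
  pvDigitsB (number_repr.reverse.foldl (fun v d => v * q + d) 0) []

-- ===== PRECONDITION & SPEC =====
-- the positional value ∑ number_repr[i] * q^i of the input; used only by Pre_
def pvVal (number_repr : List Int) (q : Int) : Int :=
  number_repr.foldr (fun d acc => acc * q + d) 0

-- Pre_ excludes inputs whose positional value is negative: there A's while loop never
-- terminates (base_10 // 10 stalls at -1), so A returns on exactly the inputs of Pre_.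
def Pre_from_any_base_to_base10 (number_repr : List Int) (q : Int) : Prop :=
  0 ≤ pvVal number_repr q
instance (number_repr : List Int) (q : Int) : Decidable (Pre_from_any_base_to_base10 number_repr q) := by
  unfold Pre_from_any_base_to_base10; infer_instance

def pvWitness_from_any_base_to_base10 : List Int × Int := ([1, 0, 1], 2)

def Spec_from_any_base_to_base10 (number_repr : List Int) (q : Int) (out : List Int) : Prop := out = from_any_base_to_base10_alt number_repr q
instance (number_repr : List Int) (q : Int) (out : List Int) : Decidable (Spec_from_any_base_to_base10 number_repr q out) := by unfold Spec_from_any_base_to_base10; infer_instance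

-- ===== CLAIM (what is proved, stated in full; the proofs are below) =====
def Claim_equal_from_any_base_to_base10 : Prop := ∀ (number_repr : List Int) (q : Int), Dom_from_any_base_to_base10 number_repr q → Pre_from_any_base_to_base10 number_repr q → Spec_from_any_base_to_base10 number_repr q (from_any_base_to_base10 number_repr q)

-- ===== LEMMAS AND PROOFS =====

-- Phase 1: A's (sum, power) fold computes s + p * (Horner value)
theorem pv_phase1 (q : Int) : ∀ (xs : List Int) (s p : Int),
    (xs.foldl (fun (st : Int × Int) d => (st.1 + d * st.2, st.2 * q)) (s, p)).1
      = s + p * pvVal xs q := by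
  intro xs
  induction xs with
  | nil => intro s p; simp [pvVal]
  | cons d t ih =>
    intro s p
    simp only [List.foldl, pvVal, List.foldr] at *
    rw [ih]
    ring

theorem pv_horner_rev (q : Int) (xs : List Int) :
    xs.reverse.foldl (fun v d => v * q + d) 0 = pvVal xs q := by
  unfold pvVal
  rw [List.foldl_reverse]

theorem pvDigitsB_zero (acc : List Int) : pvDigitsB 0 acc = acc := by
  rw [pvDigitsB]; simp

-- accumulator lemma for B's prepend loop
theorem pvDigitsB_acc : ∀ (n : Nat) (v : Int), v.toNat ≤ n → ∀ acc,
    pvDigitsB v acc = pvDigitsB v [] ++ acc := by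
  intro n
  induction n with
  | zero =>
    intro v hv acc
    have hle : v ≤ 0 := by omega
    rw [pvDigitsB]
    conv_rhs => rw [pvDigitsB]
    simp [hle]
  | succ n ih =>
    intro v hv acc
    by_cases hle : v ≤ 0
    · rw [pvDigitsB]
      conv_rhs => rw [pvDigitsB]
      simp [hle]
    · have h10 : PySem.Int.floordiv v 10 = v / 10 := PySem.Int.floordiv_eq_ediv_of_pos (by omega)
      have hn : (PySem.Int.floordiv v 10).toNat ≤ n := by rw [h10]; omega
      rw [pvDigitsB]
      conv_rhs => rw [pvDigitsB]
      simp only [hle, dite_false]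
      rw [ih _ hn, ih _ hn (PySem.Int.mod v 10 :: [])]
      simp

-- Phase 2: A's while loop with sufficient fuel is acc ++ reverse of B's digits
theorem pv_loop_eq : ∀ (fuel : Nat) (v : Int) (acc : List Int),
    0 ≤ v → v.toNat < fuel →
    pvDigitsLoopA fuel v acc = acc ++ (pvDigitsB v []).reverse := by
  intro fuel
  induction fuel with
  | zero => intro v acc _ h; omega
  | succ n ih =>
    intro v acc hv hf
    by_cases h0 : v = 0
    · subst h0
      simp [pvDigitsLoopA, pvDigitsB_zero]
    · have hpos : 0 < v := by omega
      have h10 : PySem.Int.floordiv v 10 = v / 10 := PySem.Int.floordiv_eq_ediv_of_pos (by omega)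
      have hlt : (v / 10).toNat < n := by omega
      have hge : 0 ≤ v / 10 := by omega
      simp only [pvDigitsLoopA, h0, ne_eq, not_false_eq_true, if_true]
      rw [ih _ _ (by rw [h10]; exact hge) (by rw [h10]; exact hlt)]
      have hng : ¬ v ≤ 0 := by omega
      conv_rhs => rw [pvDigitsB]
      simp only [hng, dite_false]
      simp
      rw [pvDigitsB_acc (v / 10).toNat (v / 10) le_rfl ([v % 10])]
      simp

-- ===== VERDICT (by name: the statement is the Claim_ definition above) =====
theorem from_any_base_to_base10_spec : Claim_equal_from_any_base_to_base10 := by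
  intro xs q _ hpre
  unfold Spec_from_any_base_to_base10 from_any_base_to_base10 from_any_base_to_base10_alt
  have h1 := pv_phase1 q xs 0 1
  simp only [one_mul, zero_add] at h1
  simp only [h1, pv_horner_rev]
  rw [pv_loop_eq _ _ _ hpre (by omega)]
  simp
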